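-- pv_equiv track=rewrite | github.com/johnnys7n/ImageJ_Macros_For_Batch_Analysis | CD3CD45 Quick Merge/cd3_cd45_quick_merger.py | select_channels
-- ===== SOURCE A (Python) =====
-- def select_channels(file_list):
-- 	'''
-- 	this function will put the two similar files into a list of lists
-- 	'''
--
-- 	s1 = []
-- 	s2 = []
-- 	s3 = []
-- 	s4 = []
-- 	s5 = []
-- 	s_all = []
-- 	s_list = {'s1':s1, 's2':s2, 's3':s3, 's4':s4, 's5':s5}
-- 	for file in file_list:
-- 		if 's1' in file:
-- 			s1.append(file)
-- 		if 's2' in file: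
-- 			s2.append(file)
-- 		if 's3' in file:
-- 			s3.append(file)
-- 		if 's4' in file:
-- 			s4.append(file)
-- 		if 's5' in file:
-- 			s5.append(file)
-- 	for name, value in s_list.items():
-- 		s_all.append(value)
--
-- 	return s_all
-- ===== SOURCE B (Python) =====
-- def select_channels(file_list):
--     '''
--     this function will put the two similar files into a list of lists
--     '''
--     return [[f for f in file_list if key in f] for key in ('s1', 's2', 's3', 's4', 's5')]
-- ===== Notes on version B (the rewrite author's own statement) =====
-- stated objective: idiomatic
-- what changed: Replaced the single pass with five mutable append buckets and a dict-items collection loop by a nested comprehension that loops over the fixed key tuple outside and filters file_list once per key, building the result directly in s1..s5 order.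
import Mathlib
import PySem

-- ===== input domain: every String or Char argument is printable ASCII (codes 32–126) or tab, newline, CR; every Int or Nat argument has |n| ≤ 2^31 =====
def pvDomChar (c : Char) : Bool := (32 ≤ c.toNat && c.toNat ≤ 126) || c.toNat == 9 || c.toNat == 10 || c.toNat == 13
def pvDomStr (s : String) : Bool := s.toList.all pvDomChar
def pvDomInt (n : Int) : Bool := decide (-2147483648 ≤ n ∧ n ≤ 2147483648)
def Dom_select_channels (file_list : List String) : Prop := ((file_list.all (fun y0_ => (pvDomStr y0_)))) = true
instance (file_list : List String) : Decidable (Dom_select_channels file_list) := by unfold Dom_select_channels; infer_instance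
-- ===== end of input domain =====

-- B replaces A's single pass into five mutable buckets (collected via a dict-items loop)
-- by a comprehension over the fixed key tuple filtering file_list once per key (idiomatic).


-- ===== PORT A =====
-- the per-file loop body: conditionally append `file` to each of the five buckets
def selA_step (st : List String × List String × List String × List String × List String)
    (file : String) : List String × List String × List String × List String × List String :=
  let (s1, s2, s3, s4, s5) := st
  let s1 := if PySem.Str.isIn "s1" file then s1 ++ [file] else s1
  let s2 := if PySem.Str.isIn "s2" file then s2 ++ [file] else s2
  let s3 := if PySem.Str.isIn "s3" file then s3 ++ [file] else s3
  let s4 := if PySem.Str.isIn "s4" file then s4 ++ [file] else s4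
  let s5 := if PySem.Str.isIn "s5" file then s5 ++ [file] else s5
  (s1, s2, s3, s4, s5)

def select_channels (file_list : List String) : List (List String) :=
  let st := file_list.foldl selA_step ([], [], [], [], [])
  let (s1, s2, s3, s4, s5) := st
  -- the dict s_list has keys 's1'..'s5' in insertion order; the items loop appends each value
  let s_list : PySem.Dict String (List String) :=
    PySem.Dict.ofList [("s1", s1), ("s2", s2), ("s3", s3), ("s4", s4), ("s5", s5)]
  s_list.items.foldl (fun s_all kv => s_all ++ [kv.2]) []

-- ===== PORT B =====
def select_channels_alt (file_list : List String) : List (List String) :=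
  ["s1", "s2", "s3", "s4", "s5"].map
    (fun key => file_list.filter (fun f => PySem.Str.isIn key f))

-- ===== PRECONDITION & SPEC =====
def Spec_select_channels (file_list : List String) (out : List (List String)) : Prop := out = select_channels_alt file_list
instance (file_list : List String) (out : List (List String)) : Decidable (Spec_select_channels file_list out) := by unfold Spec_select_channels; infer_instance

-- ===== CLAIM (what is proved, stated in full; the proofs are below) =====
def Claim_equal_select_channels : Prop := ∀ (file_list : List String), Dom_select_channels file_list → Spec_select_channels file_list (select_channels file_list)

-- ===== LEMMAS AND PROOFS =====
theorem selA_foldl (fs : List String)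
    (a b c d e : List String) :
    fs.foldl selA_step (a, b, c, d, e) =
      (a ++ fs.filter (fun f => PySem.Str.isIn "s1" f),
       b ++ fs.filter (fun f => PySem.Str.isIn "s2" f),
       c ++ fs.filter (fun f => PySem.Str.isIn "s3" f),
       d ++ fs.filter (fun f => PySem.Str.isIn "s4" f),
       e ++ fs.filter (fun f => PySem.Str.isIn "s5" f)) := by
  induction fs generalizing a b c d e with
  | nil => simp
  | cons f fs ih =>
    simp only [List.foldl_cons, List.filter_cons, selA_step, ih]
    split_ifs <;> simp

-- ===== VERDICT (by name: the statement is the Claim_ definition above) =====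
theorem select_channels_spec : Claim_equal_select_channels := by
  intro fl _
  show select_channels fl = select_channels_alt fl
  simp [select_channels, select_channels_alt, selA_foldl, PySem.Dict.ofList, PySem.Dict.update, PySem.Dict.insert, PySem.Dict.empty, PySem.Dict.contains]
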